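-- pv_equiv track=rewrite | github.com/ABI-Software/exf2mbfxml | src/exf2mbfxml/analysis.py | trim_groups
-- ===== SOURCE A (Python) =====
-- from typing import Union, List, Dict, Set
--
-- def trim_groups(group_dict: Dict[str, Set[int]], node_to_subtree: Dict[int, Set[int]]) -> Dict[str, Set[int]]:
--     trimmed = {}
--     for label, points in group_dict.items():
--         # Find smallest subtree that contains all group points
--         candidates = []
--         for node, subtree in node_to_subtree.items():
--             if points.issubset(subtree):
--                 candidates.append((node, subtree))
--
--         if candidates:
--             # Use the smallest subtree (most specific)
--             best_node, best_subtree = min(candidates, key=lambda item: len(item[1]))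
--             # Remove the best_node itself if it's not truly part of the group
--             cleaned = points.intersection(best_subtree - {best_node})
--             trimmed[label] = cleaned
--         else:
--             # fallback if no matching subtree
--             trimmed[label] = points
--     return trimmed
-- ===== SOURCE B (Python) =====
-- from typing import Union, List, Dict, Set
--
-- def trim_groups(group_dict: Dict[str, Set[int]], node_to_subtree: Dict[int, Set[int]]) -> Dict[str, Set[int]]:
--     # One stable sort of the subtrees by size, then per label an early-exit scan:
--     # the first superset in size order is exactly min(candidates, key=len).
--     by_size = sorted(node_to_subtree.items(), key=lambda item: len(item[1]))
--     trimmed = {}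
--     for label, points in group_dict.items():
--         best = next((pair for pair in by_size if points.issubset(pair[1])), None)
--         if best is None:
--             trimmed[label] = points
--         else:
--             # points is a subset of best's subtree, so intersecting with
--             # subtree - {best_node} is just dropping best_node.
--             trimmed[label] = points - {best[0]}
--     return trimmed
-- ===== Notes on version B (the rewrite author's own statement) =====
-- stated objective: alternative
-- what changed: Instead of building a candidate list per label and taking min by size, B sorts the subtrees once (stably, by size) and for each label takes the first superset in that order with an early exit, then trims by simply removing the best node from points (equivalent to A's intersection since points is a subset).
import Mathlib
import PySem

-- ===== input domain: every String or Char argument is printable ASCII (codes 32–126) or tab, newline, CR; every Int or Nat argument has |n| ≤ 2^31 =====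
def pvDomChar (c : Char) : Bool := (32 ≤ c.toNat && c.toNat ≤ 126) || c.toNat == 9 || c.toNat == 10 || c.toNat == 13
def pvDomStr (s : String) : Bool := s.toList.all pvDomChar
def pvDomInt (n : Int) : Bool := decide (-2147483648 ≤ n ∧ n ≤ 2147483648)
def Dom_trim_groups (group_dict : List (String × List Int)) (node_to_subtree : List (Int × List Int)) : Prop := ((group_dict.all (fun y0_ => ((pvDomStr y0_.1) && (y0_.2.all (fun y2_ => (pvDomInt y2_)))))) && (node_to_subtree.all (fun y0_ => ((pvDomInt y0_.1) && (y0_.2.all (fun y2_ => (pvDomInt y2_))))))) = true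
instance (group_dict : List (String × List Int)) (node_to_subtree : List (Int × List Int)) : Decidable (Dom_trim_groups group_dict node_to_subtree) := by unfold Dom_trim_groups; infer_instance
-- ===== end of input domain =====

-- B replaces A's per-label candidate list + min-by-size with one stable sort of the
-- subtrees by size and a first-superset early-exit scan per label (same results; objective: alternative).

-- ===== PORT A =====
def trim_groups (group_dict : List (String × List Int)) (node_to_subtree : List (Int × List Int)) : List (String × List Int) :=
  (group_dict.foldl (fun trimmed lp =>
    -- candidates = [(node, subtree) for ... if points.issubset(subtree)]
    let candidates := node_to_subtree.foldl
      (fun acc p => if PySem.Set.issubset lp.2 p.2 then acc ++ [p] else acc)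
      ([] : List (Int × List Int))
    match PySem.List.min? candidates (fun item => (item.2.length : Int)) with
    | some best =>
        -- cleaned = points.intersection(best_subtree - {best_node})
        PySem.Dict.insert trimmed lp.1 (PySem.Set.inter lp.2 (PySem.Set.diff best.2 [best.1]))
    | none => PySem.Dict.insert trimmed lp.1 lp.2)
    (PySem.Dict.mk ([] : List (String × List Int)))).items

-- ===== PORT B =====
def trim_groups_alt (group_dict : List (String × List Int)) (node_to_subtree : List (Int × List Int)) : List (String × List Int) :=
  let bySize := PySem.List.sorted node_to_subtree (fun item => (item.2.length : Int))
  (group_dict.foldl (fun trimmed lp =>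
    -- best = next((pair for pair in by_size if points.issubset(pair[1])), None)
    match bySize.find? (fun pair => PySem.Set.issubset lp.2 pair.2) with
    | none => PySem.Dict.insert trimmed lp.1 lp.2
    | some best => PySem.Dict.insert trimmed lp.1 (PySem.Set.diff lp.2 [best.1]))
    (PySem.Dict.mk ([] : List (String × List Int)))).items

-- ===== PRECONDITION & SPEC =====
def Spec_trim_groups (group_dict : List (String × List Int)) (node_to_subtree : List (Int × List Int)) (out : List (String × List Int)) : Prop := out = trim_groups_alt group_dict node_to_subtree
instance (group_dict : List (String × List Int)) (node_to_subtree : List (Int × List Int)) (out : List (String × List Int)) : Decidable (Spec_trim_groups group_dict node_to_subtree out) := by unfold Spec_trim_groups; infer_instance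

-- ===== CLAIM (what is proved, stated in full; the proofs are below) =====
def Claim_equal_trim_groups : Prop := ∀ (group_dict : List (String × List Int)) (node_to_subtree : List (Int × List Int)), Dom_trim_groups group_dict node_to_subtree → Spec_trim_groups group_dict node_to_subtree (trim_groups group_dict node_to_subtree)

-- ===== LEMMAS AND PROOFS =====

-- Inserting x into a key-sorted list: the first P-element afterwards is the
-- running-min step applied to the first P-element before.
theorem find_insertBy {α : Type} (key : α → Int) (P : α → Bool) (x : α) (ys : List α)
    (hs : ys.Pairwise (fun a b => key a ≤ key b)) :
    (PySem.List.insertBy (fun a b => decide (key a < key b)) x ys).find? P =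
      (if P x then
        match ys.find? P with
        | none => some x
        | some m => if key x < key m then some x else some m
       else ys.find? P) := by
  induction ys with
  | nil =>
    simp only [PySem.List.insertBy, List.find?]
    cases hPx : P x <;> simp
  | cons y t ih =>
    have hyt : ∀ b ∈ t, key y ≤ key b := (List.pairwise_cons.mp hs).1
    have hst : t.Pairwise (fun a b => key a ≤ key b) := (List.pairwise_cons.mp hs).2
    simp only [PySem.List.insertBy]
    by_cases hlt : key x < key y
    · simp only [hlt, decide_true, if_true]
      cases hPx : P x
      · simp [List.find?_cons, hPx]
      · rw [List.find?_cons_of_pos hPx]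
        rw [if_pos rfl]
        cases hf : (y :: t).find? P with
        | none => rfl
        | some m =>
          have hm : m ∈ y :: t := List.mem_of_find?_eq_some hf
          have hym : key y ≤ key m := by
            rcases List.mem_cons.mp hm with h | h
            · exact le_of_eq (congrArg key h.symm)
            · exact hyt m h
          simp [lt_of_lt_of_le hlt hym]
    · simp only [hlt, decide_false, Bool.false_eq_true, if_false]
      cases hPy : P y
      · rw [List.find?_cons_of_neg (by simp [hPy]), ih hst,
            List.find?_cons_of_neg (by simp [hPy])]
      · rw [List.find?_cons_of_pos hPy, List.find?_cons_of_pos hPy]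
        cases hPx : P x
        · simp
        · simp [hlt]

theorem find_sorted_eq_min {α : Type} (key : α → Int) (P : α → Bool) (xs : List α) :
    (PySem.List.sorted xs key).find? P = PySem.List.min? (xs.filter P) key := by
  induction xs using List.reverseRecOn with
  | nil => simp [PySem.List.sorted, PySem.List.min?]
  | append_singleton xs x ih =>
    have hsorted : PySem.List.sorted (xs ++ [x]) key =
        PySem.List.insertBy (fun a b => decide (key a < key b)) x (PySem.List.sorted xs key) := by
      simp [PySem.List.sorted, List.foldl_append]
    rw [hsorted, find_insertBy key P x _ (PySem.List.sorted_pairwise xs key), ih]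
    rw [List.filter_append]
    cases hPx : P x
    · simp [hPx]
    · simp only [hPx, if_true, List.filter_cons, List.filter_nil]
      simp only [PySem.List.min?, List.foldl_append, List.foldl_cons, List.foldl_nil]
      rfl

-- When points ⊆ subtree, intersecting points with subtree - {node} is just removing node.
theorem inter_diff_eq_diff (points subtree : List Int) (node : Int)
    (hsub : PySem.Set.issubset points subtree = true) :
    PySem.Set.inter points (PySem.Set.diff subtree [node]) = PySem.Set.diff points [node] := by
  have hmem : ∀ a ∈ points, a ∈ subtree := (PySem.Set.issubset_iff points subtree).mp hsub
  simp only [PySem.Set.inter, PySem.Set.diff]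
  refine List.filter_congr ?_
  intro a ha
  simp [List.contains_eq_mem, hmem a ha]

-- Per-label values of the two ports coincide.
theorem value_eq (points : List Int) (node_to_subtree : List (Int × List Int)) :
    (match PySem.List.min?
        (node_to_subtree.foldl
          (fun acc p => if PySem.Set.issubset points p.2 then acc ++ [p] else acc)
          ([] : List (Int × List Int)))
        (fun item => (item.2.length : Int)) with
     | some best => PySem.Set.inter points (PySem.Set.diff best.2 [best.1])
     | none => points) =
    (match (PySem.List.sorted node_to_subtree (fun item => (item.2.length : Int))).find?
        (fun pair => PySem.Set.issubset points pair.2) with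
     | none => points
     | some best => PySem.Set.diff points [best.1]) := by
  have hcand : node_to_subtree.foldl
      (fun acc p => if PySem.Set.issubset points p.2 then acc ++ [p] else acc)
      ([] : List (Int × List Int)) =
      node_to_subtree.filter (fun p => PySem.Set.issubset points p.2) := by
    have := PySem.List.foldl_append_if (fun p => PySem.Set.issubset points p.2)
      (fun p => p) node_to_subtree []
    simpa using this
  rw [hcand, ← find_sorted_eq_min (fun item => ((item.2.length : Int)))
      (fun pair => PySem.Set.issubset points pair.2) node_to_subtree]
  cases hf : (PySem.List.sorted node_to_subtree (fun item => (item.2.length : Int))).find?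
      (fun pair => PySem.Set.issubset points pair.2) with
  | none => rfl
  | some best =>
    have hP : PySem.Set.issubset points best.2 = true := by
      simpa using List.find?_some hf
    simpa using inter_diff_eq_diff points best.2 best.1 hP

-- Pushing the common Dict.insert out of A's match.
theorem commA (d : PySem.Dict String (List Int)) (x : String) (pts : List Int)
    (o : Option (Int × List Int)) :
    (match o with
     | some best => PySem.Dict.insert d x (PySem.Set.inter pts (PySem.Set.diff best.2 [best.1]))
     | none => PySem.Dict.insert d x pts) =
    PySem.Dict.insert d x
      (match o with
       | some best => PySem.Set.inter pts (PySem.Set.diff best.2 [best.1])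
       | none => pts) := by
  cases o <;> rfl

-- Pushing the common Dict.insert out of B's match.
theorem commB (d : PySem.Dict String (List Int)) (x : String) (pts : List Int)
    (o : Option (Int × List Int)) :
    (match o with
     | none => PySem.Dict.insert d x pts
     | some best => PySem.Dict.insert d x (PySem.Set.diff pts [best.1])) =
    PySem.Dict.insert d x
      (match o with
       | none => pts
       | some best => PySem.Set.diff pts [best.1]) := by
  cases o <;> rfl

-- The two folds over group_dict agree from any accumulator.
theorem fold_eq (node_to_subtree : List (Int × List Int)) :
    ∀ (l : List (String × List Int)) (d : PySem.Dict String (List Int)),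
    List.foldl (fun trimmed lp =>
      let candidates := node_to_subtree.foldl
        (fun acc p => if PySem.Set.issubset lp.2 p.2 then acc ++ [p] else acc)
        ([] : List (Int × List Int))
      match PySem.List.min? candidates (fun item => (item.2.length : Int)) with
      | some best =>
          PySem.Dict.insert trimmed lp.1 (PySem.Set.inter lp.2 (PySem.Set.diff best.2 [best.1]))
      | none => PySem.Dict.insert trimmed lp.1 lp.2) d l =
    List.foldl (fun trimmed lp =>
      match (PySem.List.sorted node_to_subtree (fun item => (item.2.length : Int))).find?
          (fun pair => PySem.Set.issubset lp.2 pair.2) with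
      | none => PySem.Dict.insert trimmed lp.1 lp.2
      | some best => PySem.Dict.insert trimmed lp.1 (PySem.Set.diff lp.2 [best.1])) d l := by
  intro l
  induction l with
  | nil => intro d; rfl
  | cons lp rest ih =>
    intro d
    rw [List.foldl_cons, List.foldl_cons]
    have hstep :
        (let candidates := node_to_subtree.foldl
            (fun acc p => if PySem.Set.issubset lp.2 p.2 then acc ++ [p] else acc)
            ([] : List (Int × List Int))
         match PySem.List.min? candidates (fun item => (item.2.length : Int)) with
         | some best =>
             PySem.Dict.insert d lp.1 (PySem.Set.inter lp.2 (PySem.Set.diff best.2 [best.1]))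
         | none => PySem.Dict.insert d lp.1 lp.2) =
        (match (PySem.List.sorted node_to_subtree (fun item => (item.2.length : Int))).find?
            (fun pair => PySem.Set.issubset lp.2 pair.2) with
         | none => PySem.Dict.insert d lp.1 lp.2
         | some best => PySem.Dict.insert d lp.1 (PySem.Set.diff lp.2 [best.1])) := by
      show (match PySem.List.min?
              (node_to_subtree.foldl
                (fun acc p => if PySem.Set.issubset lp.2 p.2 then acc ++ [p] else acc)
                ([] : List (Int × List Int)))
              (fun item => (item.2.length : Int)) with
            | some best =>
                PySem.Dict.insert d lp.1 (PySem.Set.inter lp.2 (PySem.Set.diff best.2 [best.1]))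
            | none => PySem.Dict.insert d lp.1 lp.2) = _
      rw [commA, commB]
      exact congrArg (PySem.Dict.insert d lp.1) (value_eq lp.2 node_to_subtree)
    rw [hstep, ih]

-- ===== VERDICT (by name: the statement is the Claim_ definition above) =====
theorem trim_groups_spec : Claim_equal_trim_groups := by
  intro group_dict node_to_subtree _
  unfold Spec_trim_groups trim_groups trim_groups_alt
  exact congrArg PySem.Dict.items (fold_eq node_to_subtree group_dict (PySem.Dict.mk []))
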